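-- pv_equiv track=rewrite | github.com/bashbash96/InterviewPreparation | Cracking The Coding Interview/Moderate.py | getRightSub
-- ===== SOURCE A (Python) =====
-- def getRightSub(arr):
--     right = len(arr) - 1
--
--     for i in range(len(arr) - 2, -1, -1):
--         if arr[i] > arr[i + 1]:
--             return right
--         else:
--             right = i
--
--     return right
-- ===== SOURCE B (Python) =====
-- def getRightSub(arr):
--     if not arr:
--         return -1
--     result = 0
--     for i in range(len(arr) - 1):
--         if arr[i] > arr[i + 1]:
--             result = i + 1
--     return result
-- ===== Notes on version B (the rewrite author's own statement) =====
-- stated objective: simpler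
-- what changed: Replaces the right-to-left scan with early return and a maintained `right` index by a single left-to-right pass over adjacent pairs that records the index just past the last descent, with an explicit -1 for the empty list.
import Mathlib
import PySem

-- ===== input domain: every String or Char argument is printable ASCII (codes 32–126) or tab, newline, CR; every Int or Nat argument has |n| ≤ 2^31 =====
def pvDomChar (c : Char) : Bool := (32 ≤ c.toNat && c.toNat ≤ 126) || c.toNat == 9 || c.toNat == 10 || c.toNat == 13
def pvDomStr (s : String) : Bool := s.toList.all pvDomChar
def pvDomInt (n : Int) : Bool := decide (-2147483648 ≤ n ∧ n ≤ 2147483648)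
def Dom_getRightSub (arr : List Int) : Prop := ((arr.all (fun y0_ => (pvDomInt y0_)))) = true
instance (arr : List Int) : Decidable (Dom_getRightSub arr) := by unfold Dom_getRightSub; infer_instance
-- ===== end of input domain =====

-- B replaces A's right-to-left scan with early return by a single left-to-right pass
-- recording the index just past the last descent (objective: simpler).

-- ===== PORT A =====
-- loop over range(len(arr)-2, -1, -1) with state `right`, returning early at a descent.
-- Indices produced by the range are always in bounds, so pyGetD with default 0 is exact here.
def getRightSubGo (arr : List Int) : List Int → Int → Int
  | [], right => right
  | i :: rest, right =>
      if PySem.List.pyGetD arr i 0 > PySem.List.pyGetD arr (i + 1) 0 then right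
      else getRightSubGo arr rest i

def getRightSub (arr : List Int) : Int :=
  getRightSubGo arr (PySem.List.pyRange ((arr.length : Int) - 2) (-1) (-1)) ((arr.length : Int) - 1)

-- ===== PORT B =====
-- left-to-right fold over range(len(arr)-1): result := i+1 at each descent.
def getRightSub_alt (arr : List Int) : Int :=
  if arr = [] then -1
  else
    (PySem.List.pyRange 0 ((arr.length : Int) - 1) 1).foldl
      (fun result i =>
        if PySem.List.pyGetD arr i 0 > PySem.List.pyGetD arr (i + 1) 0 then i + 1 else result) 0

-- ===== PRECONDITION & SPEC =====
def Spec_getRightSub (arr : List Int) (out : Int) : Prop := out = getRightSub_alt arr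
instance (arr : List Int) (out : Int) : Decidable (Spec_getRightSub arr out) := by unfold Spec_getRightSub; infer_instance

-- ===== CLAIM (what is proved, stated in full; the proofs are below) =====
def Claim_equal_getRightSub : Prop := ∀ (arr : List Int), Dom_getRightSub arr → Spec_getRightSub arr (getRightSub arr)

-- ===== LEMMAS AND PROOFS =====

-- core invariant: A's countdown scan starting at index k with right = k+1 equals
-- B's fold over [0..k].
theorem getRightSub_key (arr : List Int) (k : Nat) :
    getRightSubGo arr (PySem.List.pyRange (k : Int) (-1) (-1)) ((k : Int) + 1)
      = (PySem.List.pyRange 0 ((k : Int) + 1) 1).foldl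
          (fun result i =>
            if PySem.List.pyGetD arr i 0 > PySem.List.pyGetD arr (i + 1) 0 then i + 1 else result) 0 := by
  induction k with
  | zero =>
      rw [PySem.List.pyRange_neg_one_cons (by norm_num),
          PySem.List.pyRange_neg_one_eq_nil (by norm_num),
          PySem.List.pyRange_one_cons (by norm_num),
          PySem.List.pyRange_one_eq_nil (by norm_num)]
      simp [getRightSubGo]
  | succ k ih =>
      rw [show ((k + 1 : Nat) : Int) = (k : Int) + 1 by push_cast; ring] at *
      rw [PySem.List.pyRange_neg_one_cons (by omega),
          show (k : Int) + 1 - 1 = (k : Int) by ring,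
          PySem.List.pyRange_one_succ_right (by omega)]
      simp only [getRightSubGo, List.foldl_append, List.foldl_cons, List.foldl_nil]
      split
      · rfl
      · exact ih

theorem getRightSub_spec' (arr : List Int) : getRightSub arr = getRightSub_alt arr := by
  unfold getRightSub getRightSub_alt
  match arr with
  | [] =>
      rw [PySem.List.pyRange_neg_one_eq_nil (by norm_num)]
      simp [getRightSubGo]
  | [a] =>
      rw [PySem.List.pyRange_neg_one_eq_nil (by norm_num)]
      simp [getRightSubGo]
  | a :: b :: rest =>
      have h1 : (((a :: b :: rest).length : Int) - 2) = ((rest.length : Nat) : Int) := by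
        push_cast [List.length]; ring
      have h2 : (((a :: b :: rest).length : Int) - 1) = ((rest.length : Nat) : Int) + 1 := by
        push_cast [List.length]; ring
      rw [h1, h2, if_neg (by simp)]
      exact getRightSub_key (a :: b :: rest) rest.length

-- ===== VERDICT (by name: the statement is the Claim_ definition above) =====
theorem getRightSub_spec : Claim_equal_getRightSub := by
  intro arr _
  unfold Spec_getRightSub
  exact getRightSub_spec' arr
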